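-- pv_equiv track=rewrite | github.com/octa1124/femsolver | tools/release/render_release_notes.py | render_release_notes
-- ===== SOURCE A (Python) =====
-- from collections import defaultdict
-- from typing import Any
--
-- def render_release_notes(version: str, fragments: list[dict[str, Any]]) -> str:
--     grouped: dict[str, list[str]] = defaultdict(list)
--     for fragment in fragments:
--         grouped[str(fragment["type"])].append(f"- {fragment['scope']}: {fragment['summary']}")
--
--     lines = [f"# {version} Release Draft", "", "## Completed", ""]
--     for category in sorted(grouped):
--         lines.append(f"### {category.capitalize()}")
--         lines.extend(grouped[category])
--         lines.append("")
--
--     lines.extend(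
--         [
--             "## Not Completed",
--             "",
--             "- Fill in version-specific deferred work before release.",
--             "",
--             "## Known Risks",
--             "",
--             "- Fill in known risks before release.",
--             "",
--             "## Compatibility Changes",
--             "",
--             "- Fill in compatibility notes before release.",
--             "",
--             "## Next Version Handoff",
--             "",
--             "- Fill in next-version handoff items before release.",
--         ]
--     )
--     return "\n".join(lines) + "\n"
-- ===== SOURCE B (Python) =====
-- def render_release_notes(version: str, fragments: list) -> str:
--     # Sort a copy by stringified type (stable), then emit category runs in one sweep.
--     frags = sorted(fragments, key=lambda f: str(f["type"]))
--     lines = [f"# {version} Release Draft", "", "## Completed", ""]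
--     i, n = 0, len(frags)
--     while i < n:
--         category = str(frags[i]["type"])
--         lines.append(f"### {category.capitalize()}")
--         while i < n and str(frags[i]["type"]) == category:
--             f = frags[i]
--             lines.append(f"- {f['scope']}: {f['summary']}")
--             i += 1
--         lines.append("")
--     lines += [
--         "## Not Completed",
--         "",
--         "- Fill in version-specific deferred work before release.",
--         "",
--         "## Known Risks",
--         "",
--         "- Fill in known risks before release.",
--         "",
--         "## Compatibility Changes",
--         "",
--         "- Fill in compatibility notes before release.",
--         "",
--         "## Next Version Handoff",
--         "",
--         "- Fill in next-version handoff items before release.",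
--     ]
--     return "\n".join(lines) + "\n"
-- ===== Notes on version B (the rewrite author's own statement) =====
-- stated objective: alternative
-- what changed: Replaces A's defaultdict grouping plus a separate sorted-keys pass with a stable sort of the fragments by stringified type followed by a single sweep that emits each equal-key run as a section.
import Mathlib
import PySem

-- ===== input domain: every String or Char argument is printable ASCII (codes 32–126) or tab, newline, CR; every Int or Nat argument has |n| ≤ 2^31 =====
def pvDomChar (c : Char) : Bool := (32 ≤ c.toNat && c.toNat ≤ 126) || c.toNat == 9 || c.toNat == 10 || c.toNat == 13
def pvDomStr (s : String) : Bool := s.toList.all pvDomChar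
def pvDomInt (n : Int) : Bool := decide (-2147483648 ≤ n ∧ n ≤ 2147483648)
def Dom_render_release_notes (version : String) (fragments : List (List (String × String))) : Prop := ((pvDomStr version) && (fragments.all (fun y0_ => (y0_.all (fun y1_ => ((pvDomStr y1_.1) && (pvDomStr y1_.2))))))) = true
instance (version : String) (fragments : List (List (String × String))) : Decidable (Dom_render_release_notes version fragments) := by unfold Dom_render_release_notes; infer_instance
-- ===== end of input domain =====

-- B sorts the fragments by their stringified type (stable) and emits category runs in one
-- sweep, instead of A's defaultdict grouping followed by a separate sorted-keys pass (objective: alternative).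


-- ===== PORT A =====
-- shared with B: str(fragment["type"]) (first-match dict lookup; the default "" is never
-- reached inside Pre_, which demands the key be present)
def pvKey (f : List (String × String)) : String := (PySem.Dict.mk f).getD "type" ""
-- shared with B: the f-string "- {scope}: {summary}"
def pvLine (f : List (String × String)) : String :=
  "- " ++ (PySem.Dict.mk f).getD "scope" "" ++ ": " ++ (PySem.Dict.mk f).getD "summary" ""
-- str.capitalize, hand-ported: exact on the ASCII domain (first char uppercased, rest lowercased)
def pvCapitalize (s : String) : String :=
  match s.toList with
  | [] => s
  | c :: rest => String.ofList (PySem.Chars.upper [c] ++ PySem.Chars.lower rest)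
-- the fixed trailing boilerplate sections (identical literals in both Pythons)
def pvFooter : List String :=
  ["## Not Completed", "", "- Fill in version-specific deferred work before release.", "",
   "## Known Risks", "", "- Fill in known risks before release.", "",
   "## Compatibility Changes", "", "- Fill in compatibility notes before release.", "",
   "## Next Version Handoff", "", "- Fill in next-version handoff items before release."]

def render_release_notes (version : String) (fragments : List (List (String × String))) : String :=
  let grouped : PySem.Dict String (List String) :=
    fragments.foldl (fun d f => d.modify (pvKey f) [] (fun v => v ++ [pvLine f])) PySem.Dict.empty
  let lines : List String := ["# " ++ version ++ " Release Draft", "", "## Completed", ""]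
  let lines := (PySem.List.sorted grouped.keys (fun c => c)).foldl
      (fun acc c => acc ++ (("### " ++ pvCapitalize c) :: grouped.getD c [] ++ [""])) lines
  PySem.Str.join "\n" (lines ++ pvFooter) ++ "\n"

-- ===== PORT B =====
-- the inner while loop of B: consume one maximal run of equal keys, emit its section, recurse
def pvEmit : List (List (String × String)) → List String
  | [] => []
  | f :: rest =>
    ("### " ++ pvCapitalize (pvKey f)) ::
      ((f :: rest.takeWhile (fun g => pvKey g == pvKey f)).map pvLine
        ++ [""] ++ pvEmit (rest.dropWhile (fun g => pvKey g == pvKey f)))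
termination_by l => l.length
decreasing_by
  simp only [List.length_cons]
  exact Nat.lt_succ_of_le (List.length_dropWhile_le _ _)

def render_release_notes_alt (version : String) (fragments : List (List (String × String))) : String :=
  let frags := PySem.List.sorted fragments pvKey
  let lines : List String := ["# " ++ version ++ " Release Draft", "", "## Completed", ""]
  PySem.Str.join "\n" (lines ++ pvEmit frags ++ pvFooter) ++ "\n"

-- ===== PRECONDITION & SPEC =====
-- Pre_ excludes exactly the fragments lacking a "type", "scope" or "summary" key, on which
-- the Python raises KeyError.
def Pre_render_release_notes (version : String) (fragments : List (List (String × String))) : Prop :=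
  ∀ f ∈ fragments, (PySem.Dict.mk f).contains "type" = true ∧
    (PySem.Dict.mk f).contains "scope" = true ∧ (PySem.Dict.mk f).contains "summary" = true
instance (version : String) (fragments : List (List (String × String))) : Decidable (Pre_render_release_notes version fragments) := by unfold Pre_render_release_notes; infer_instance
def pvWitness_render_release_notes : String × (List (List (String × String))) :=
  ("1.0", [[("type", "feat"), ("scope", "core"), ("summary", "solver")],
           [("type", "fix"), ("scope", "mesh"), ("summary", "bounds")]])

def Spec_render_release_notes (version : String) (fragments : List (List (String × String))) (out : String) : Prop := out = render_release_notes_alt version fragments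
instance (version : String) (fragments : List (List (String × String))) (out : String) : Decidable (Spec_render_release_notes version fragments out) := by unfold Spec_render_release_notes; infer_instance

-- ===== CLAIM (what is proved, stated in full; the proofs are below) =====
def Claim_equal_render_release_notes : Prop := ∀ (version : String) (fragments : List (List (String × String))), Dom_render_release_notes version fragments → Pre_render_release_notes version fragments → Spec_render_release_notes version fragments (render_release_notes version fragments)

-- ===== LEMMAS AND PROOFS =====

-- the section emitted for category c, reading the entries out of `l`
def pvSec (l : List (List (String × String))) (c : String) : List String :=
  ("### " ++ pvCapitalize c) :: ((l.filter (fun f => pvKey f == c)).map pvLine ++ [""])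

lemma grouped_getD (fragments : List (List (String × String))) (c : String) :
    (fragments.foldl (fun d f => d.modify (pvKey f) [] (fun v => v ++ [pvLine f]))
      PySem.Dict.empty).getD c []
      = (fragments.filter (fun f => pvKey f == c)).map pvLine := by
  have h := PySem.Dict.getD_foldl_modify_append
    (fragments.map (fun f => (pvKey f, pvLine f))) (PySem.Dict.empty (κ := String) (ν := List String)) c
  rw [List.foldl_map] at h
  simpa [List.filter_map, List.map_map, Function.comp] using h

lemma grouped_keys (fragments : List (List (String × String))) :
    (fragments.foldl (fun d f => d.modify (pvKey f) [] (fun v => v ++ [pvLine f]))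
      PySem.Dict.empty).keys = PySem.Set.ofList (fragments.map pvKey) := by
  rw [PySem.Dict.keys_foldl_modify_key fragments pvKey [] (fun _ f => (fun v => v ++ [pvLine f]))]
  simp [PySem.Set.update, PySem.Set.ofList_eq_foldl]


lemma pairwise_insertBy (x : List (String × String)) (acc : List (List (String × String)))
    (h : acc.Pairwise (fun a b => pvKey a ≤ pvKey b)) :
    (PySem.List.insertBy (fun a b => decide (pvKey a < pvKey b)) x acc).Pairwise
      (fun a b => pvKey a ≤ pvKey b) := by
  induction acc with
  | nil => simp [PySem.List.insertBy]
  | cons y ys ih =>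
    rw [List.pairwise_cons] at h
    rw [PySem.List.insertBy]
    split_ifs with hb
    · simp only [decide_eq_true_eq] at hb
      refine List.Pairwise.cons ?_ (List.Pairwise.cons h.1 h.2)
      intro a ha
      rcases List.mem_cons.mp ha with rfl | ha
      · exact le_of_lt hb
      · exact le_trans (le_of_lt hb) (h.1 a ha)
    · simp only [decide_eq_true_eq, not_lt] at hb
      refine List.Pairwise.cons ?_ (ih h.2)
      intro a ha
      rcases (PySem.List.mem_insertBy _ _ _ _).mp ha with rfl | ha
      · exact hb
      · exact h.1 a ha

lemma filter_insertBy (c : String) (x : List (String × String))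
    (acc : List (List (String × String)))
    (h : acc.Pairwise (fun a b => pvKey a ≤ pvKey b)) :
    (PySem.List.insertBy (fun a b => decide (pvKey a < pvKey b)) x acc).filter
        (fun f => pvKey f == c)
      = acc.filter (fun f => pvKey f == c) ++ (if pvKey x == c then [x] else []) := by
  induction acc with
  | nil => rw [PySem.List.insertBy]; by_cases hx : (pvKey x == c) = true <;> simp [hx]
  | cons y ys ih =>
    rw [List.pairwise_cons] at h
    rw [PySem.List.insertBy]
    by_cases hb : decide (pvKey x < pvKey y) = true
    · rw [if_pos hb]
      simp only [decide_eq_true_eq] at hb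
      by_cases hx : (pvKey x == c) = true
      · have hc : pvKey x = c := by simpa using hx
        have hyc : List.filter (fun f => pvKey f == c) (y :: ys) = [] := by
          apply List.filter_eq_nil_iff.mpr
          intro a ha
          have hgt : pvKey x < pvKey a := by
            rcases List.mem_cons.mp ha with rfl | ha'
            · exact hb
            · exact lt_of_lt_of_le hb (h.1 a ha')
          simp only [beq_iff_eq]
          rw [← hc]
          exact ne_of_gt hgt
        rw [List.filter_cons, hyc]
        simp [hx]
      · rw [List.filter_cons]
        simp [hx]
    · rw [if_neg hb]
      rw [List.filter_cons, List.filter_cons, ih h.2]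
      by_cases hy : (pvKey y == c) = true <;> simp [hy]

lemma filter_foldl_insertBy (c : String) (xs : List (List (String × String))) :
    ∀ acc, acc.Pairwise (fun a b => pvKey a ≤ pvKey b) →
    (xs.foldl (fun acc x => PySem.List.insertBy (fun a b => decide (pvKey a < pvKey b)) x acc)
        acc).filter (fun f => pvKey f == c)
      = acc.filter (fun f => pvKey f == c) ++ xs.filter (fun f => pvKey f == c) := by
  induction xs with
  | nil => intro acc _; simp
  | cons x xs ih =>
    intro acc hacc
    rw [List.foldl_cons, ih _ (pairwise_insertBy x acc hacc), filter_insertBy c x acc hacc,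
        List.filter_cons]
    split_ifs <;> simp

lemma filter_sorted (fragments : List (List (String × String))) (c : String) :
    (PySem.List.sorted fragments pvKey).filter (fun f => pvKey f == c)
      = fragments.filter (fun f => pvKey f == c) := by
  rw [PySem.List.sorted_eq_foldl_insertBy, filter_foldl_insertBy c fragments [] (by simp)]
  simp

-- head of dropWhile fails the predicate
lemma pvDropWhile_head_false {α} (p : α → Bool) (l : List α) (a : α) (t : List α)
    (h : l.dropWhile p = a :: t) : p a = false := by
  induction l with
  | nil => simp at h
  | cons x xs ih =>
    rw [List.dropWhile_cons] at h
    by_cases hp : p x = true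
    · rw [if_pos hp] at h; exact ih h
    · rw [if_neg hp] at h
      cases h
      simpa using hp

lemma pvEmit_eq (xs : List (List (String × String)))
    (h : xs.Pairwise (fun a b => pvKey a ≤ pvKey b)) :
    pvEmit xs = (PySem.List.sorted (PySem.Set.ofList (xs.map pvKey)) (fun c => c)).flatMap
      (pvSec xs) := by
  induction xs using pvEmit.induct with
  | case1 => simp [pvEmit, PySem.Set.ofList, PySem.List.sorted]
  | case2 f rest ih =>
    rw [List.pairwise_cons] at h
    set k := pvKey f with hk
    set run := rest.takeWhile (fun g => pvKey g == k) with hrunDef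
    set rest' := rest.dropWhile (fun g => pvKey g == k) with hrest'Def
    have hsplit : run ++ rest' = rest := List.takeWhile_append_dropWhile
    have hrun : ∀ g ∈ run, pvKey g = k := by
      intro g hg
      have := List.mem_takeWhile_imp hg
      simpa using this
    have hrest'Sub : rest' ⊆ rest := (List.dropWhile_sublist _).subset
    have hpw' : rest'.Pairwise (fun a b => pvKey a ≤ pvKey b) :=
      h.2.sublist (List.dropWhile_sublist _)
    have hgt : ∀ g ∈ rest', k < pvKey g := by
      intro g hg
      cases hr : rest' with
      | nil => rw [hr] at hg; simp at hg
      | cons a t =>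
        have hne : pvKey a ≠ k := by
          have hdw : rest.dropWhile (fun g => pvKey g == k) = a :: t := by
            rw [← hrest'Def]; exact hr
          simpa using pvDropWhile_head_false _ _ _ _ hdw
        have hka : k < pvKey a :=
          lt_of_le_of_ne (h.1 a (hrest'Sub (by rw [hr]; simp))) (Ne.symm hne)
        rw [hr] at hg
        rcases List.mem_cons.mp hg with rfl | hg
        · exact hka
        · have : pvKey a ≤ pvKey g := by
            rw [hr] at hpw'
            exact (List.pairwise_cons.mp hpw').1 g hg
          exact lt_of_lt_of_le hka this
    -- the sorted distinct keys of xs are k followed by those of rest'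
    have hS' := PySem.List.sorted_ofList_pairwise_lt (rest'.map pvKey)
    have hndS' : (PySem.List.sorted (PySem.Set.ofList (rest'.map pvKey)) (fun c => c)).Nodup :=
      hS'.imp (fun hlt => ne_of_lt hlt)
    have hmemS' : ∀ c, c ∈ PySem.List.sorted (PySem.Set.ofList (rest'.map pvKey)) (fun c => c)
        ↔ c ∈ rest'.map pvKey := by
      intro c
      rw [PySem.List.mem_sorted, PySem.Set.mem_ofList]
    have hgtS' : ∀ c ∈ PySem.List.sorted (PySem.Set.ofList (rest'.map pvKey)) (fun c => c),
        k < c := by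
      intro c hc
      rcases List.mem_map.mp ((hmemS' c).mp hc) with ⟨g, hg, rfl⟩
      exact hgt g hg
    have hkeys : PySem.List.sorted (PySem.Set.ofList ((f :: rest).map pvKey)) (fun c => c)
        = k :: PySem.List.sorted (PySem.Set.ofList (rest'.map pvKey)) (fun c => c) := by
      apply PySem.List.sorted_eq_of_perm_of_pairwise_lt
      · rw [List.perm_ext_iff_of_nodup
          (List.nodup_cons.mpr ⟨fun hc => lt_irrefl k (hgtS' k hc), hndS'⟩)
          (PySem.Set.nodup_ofList _)]
        intro c
        rw [List.mem_cons, hmemS' c, PySem.Set.mem_ofList]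
        constructor
        · rintro (rfl | hc)
          · exact List.mem_map.mpr ⟨f, by simp, hk.symm⟩
          · rw [← hsplit] at *
            simp only [List.map_append, List.mem_append, List.map_cons, List.mem_cons]
            right; right
            exact hc
        · intro hc
          rw [← hsplit] at hc
          simp only [List.map_cons, List.map_append, List.mem_cons, List.mem_append] at hc
          rcases hc with rfl | hc | hc
          · left; rfl
          · rcases List.mem_map.mp hc with ⟨g, hg, rfl⟩
            left; exact hrun g hg
          · right; exact hc
      · exact List.pairwise_cons.mpr ⟨hgtS', hS'⟩
    -- section at k reads f :: run
    have hfiltK : (f :: rest).filter (fun g => pvKey g == k) = f :: run := by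
      rw [List.filter_cons_of_pos (by simp [hk]), ← hsplit, List.filter_append]
      rw [List.filter_eq_self.mpr (by intro g hg; simpa using hrun g hg)]
      rw [List.filter_eq_nil_iff.mpr (by intro g hg; simpa using ne_of_gt (hgt g hg))]
      simp
    -- sections at the remaining keys read only rest'
    have hfiltC : ∀ c, k < c → (f :: rest).filter (fun g => pvKey g == c)
        = rest'.filter (fun g => pvKey g == c) := by
      intro c hcgt
      rw [List.filter_cons_of_neg (by simpa using ne_of_lt hcgt), ← hsplit, List.filter_append]
      rw [List.filter_eq_nil_iff.mpr
        (by intro g hg; simpa [hrun g hg] using ne_of_lt hcgt)]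
      simp
    have htail : List.flatMap (pvSec (f :: rest))
          (PySem.List.sorted (PySem.Set.ofList (rest'.map pvKey)) (fun c => c))
        = List.flatMap (pvSec rest')
          (PySem.List.sorted (PySem.Set.ofList (rest'.map pvKey)) (fun c => c)) :=
      List.flatMap_congr (fun c hc => by simp only [pvSec, hfiltC c (hgtS' c hc)])
    rw [pvEmit, hkeys, List.flatMap_cons, ih hpw', htail]
    simp only [pvSec, hfiltK]
    simp
    exact ⟨rfl, rfl⟩

-- ===== VERDICT (by name: the statement is the Claim_ definition above) =====
set_option maxHeartbeats 1000000 in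
theorem render_release_notes_spec : Claim_equal_render_release_notes := by
  intro version fragments _ _
  unfold Spec_render_release_notes
  have hbody : (PySem.List.sorted
        ((fragments.foldl (fun d f => d.modify (pvKey f) [] (fun v => v ++ [pvLine f]))
          PySem.Dict.empty).keys) (fun c => c)).foldl
        (fun acc c => acc ++ (("### " ++ pvCapitalize c) ::
          ((fragments.foldl (fun d f => d.modify (pvKey f) [] (fun v => v ++ [pvLine f]))
            PySem.Dict.empty).getD c [] ++ [""])))
        ["# " ++ version ++ " Release Draft", "", "## Completed", ""]
      = ["# " ++ version ++ " Release Draft", "", "## Completed", ""]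
          ++ pvEmit (PySem.List.sorted fragments pvKey) := by
    rw [PySem.List.foldl_append_eq_flatMap]
    congr 1
    rw [pvEmit_eq _ (PySem.List.sorted_pairwise fragments pvKey)]
    have hperm : (PySem.Set.ofList ((PySem.List.sorted fragments pvKey).map pvKey)).Perm
        (PySem.Set.ofList (fragments.map pvKey)) := by
      rw [List.perm_ext_iff_of_nodup (PySem.Set.nodup_ofList _) (PySem.Set.nodup_ofList _)]
      intro c
      rw [PySem.Set.mem_ofList, PySem.Set.mem_ofList]
      exact ((PySem.List.sorted_perm fragments pvKey false).map pvKey).mem_iff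
    have hkeyseq : PySem.List.sorted
          (PySem.Set.ofList ((PySem.List.sorted fragments pvKey).map pvKey)) (fun c => c)
        = PySem.List.sorted (PySem.Set.ofList (fragments.map pvKey)) (fun c => c) :=
      PySem.List.sorted_eq_sorted_of_perm _ _ _ (fun _ _ h => h) hperm
    rw [grouped_keys, hkeyseq]
    apply List.flatMap_congr
    intro c _
    rw [grouped_getD]
    simp only [pvSec, filter_sorted]
  simp only [render_release_notes, render_release_notes_alt]
  have hfin := congrArg (fun L => PySem.Str.join "\n" (L ++ pvFooter) ++ "\n") hbody
  simpa [List.append_assoc] using hfin
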